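-- pv_equiv track=rewrite | github.com/smallwanderer/smallwanderer-bkjhub | 프로그래머스/4/72416. 매출 하락 최소화/매출 하락 최소화.py | solution
-- ===== SOURCE A (Python) =====
-- def solution(sales, links):
--     n = len(sales)
--     tree = [[] for _ in range(n + 1)]
--     has_parent = [False] * (n + 1)
--
--     for a, b in links:
--         tree[a].append(b)
--         has_parent[b] = True
--
--     root = 1
--     for i in range(1, n + 1):
--         if not has_parent[i]:
--             root = i
--             break
--
--     INF = 10**18
--     dp = [[0, 0] for _ in range(n + 1)]
--
--     def dfs(node):
--         if not tree[node]:
--             dp[node][0] = 0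
--             dp[node][1] = sales[node - 1]
--             return
--
--         child_sum = 0
--         extra = INF
--
--         for child in tree[node]:
--             dfs(child)
--             m = min(dp[child][0], dp[child][1])
--             child_sum += m
--             extra = min(extra, dp[child][1] - m)
--
--         dp[node][1] = sales[node - 1] + child_sum
--         dp[node][0] = child_sum + extra
--
--     dfs(root)
--     return min(dp[root][0], dp[root][1])
-- ===== SOURCE B (Python) =====
-- def solution(sales, links):
--     n = len(sales)
--     tree = [[] for _ in range(n + 1)]
--     has_parent = [False] * (n + 1)
--     for a, b in links:
--         tree[a].append(b)
--         has_parent[b] = True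
--
--     root = 1
--     for i in range(1, n + 1):
--         if not has_parent[i]:
--             root = i
--             break
--
--     INF = 10**18
--     dp = {}
--     stack = [(root, False)]
--     while stack:
--         node, processed = stack.pop()
--         kids = tree[node]
--         if not processed:
--             stack.append((node, True))
--             for child in reversed(kids):
--                 stack.append((child, False))
--         else:
--             if not kids:
--                 dp[node] = (0, sales[node - 1])
--             else:
--                 child_sum = 0
--                 extra = INF
--                 for child in kids:
--                     c0, c1 = dp[child]
--                     m = c0 if c0 < c1 else c1
--                     child_sum += m
--                     if c1 - m < extra:
--                         extra = c1 - m
--                 dp[node] = (child_sum + extra, sales[node - 1] + child_sum)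
--     r0, r1 = dp[root]
--     return r0 if r0 < r1 else r1
-- ===== Notes on version B (the rewrite author's own statement) =====
-- stated objective: alternative
-- what changed: Same tree/has_parent/root construction, but the recursive dfs writing a global dp array is replaced by an explicit-stack post-order loop that stores each node's (dp0, dp1) pair in a dictionary.
-- outside the precondition, e.g. on solution([1, 2, 3], [[2, 3], [3, 2]]): A returns 0, B returns 0; on solution([1, 2], [[1, 2], [1, 2]]): A returns 1, B returns 1; on solution([5, 7], [[1, -1]]): A returns 5, B returns 5
import Mathlib
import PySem

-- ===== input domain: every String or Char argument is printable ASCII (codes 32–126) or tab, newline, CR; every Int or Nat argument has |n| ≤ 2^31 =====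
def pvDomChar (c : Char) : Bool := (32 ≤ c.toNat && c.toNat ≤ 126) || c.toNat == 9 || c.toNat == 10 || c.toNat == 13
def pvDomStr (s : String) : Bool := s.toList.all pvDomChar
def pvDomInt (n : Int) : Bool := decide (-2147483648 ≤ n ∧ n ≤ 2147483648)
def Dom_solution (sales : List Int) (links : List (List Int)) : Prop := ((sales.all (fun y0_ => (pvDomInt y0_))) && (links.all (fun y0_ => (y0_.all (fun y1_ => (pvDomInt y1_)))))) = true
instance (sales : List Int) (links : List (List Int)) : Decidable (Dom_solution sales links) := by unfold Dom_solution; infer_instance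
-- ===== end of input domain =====

-- B keeps A's tree/root construction but replaces the recursive dfs over a global dp array by an explicit-stack post-order loop storing (dp0, dp1) pairs in a dict (alternative decomposition, same cost).

def pvINF : Int := 10 ^ 18

-- ===== PORT A =====
-- l[0] / l[1] of a link ('for a, b in links'); exact when the link has length 2 (guaranteed by Pre_)
def pvLinkA (l : List Int) : Int := PySem.List.pyGetD l 0 0
def pvLinkB (l : List Int) : Int := PySem.List.pyGetD l 1 0

-- 'tree[a].append(b) for a, b in links', read pointwise: the children of x in link order
-- (exact for the in-range indices Pre_ admits; out-of-range links raise in Python and are outside Pre_)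
def treeA (links : List (List Int)) (x : Int) : List Int :=
  links.foldl (fun acc l => if pvLinkA l == x then acc ++ [pvLinkB l] else acc) []

-- 'has_parent[b] = True for a, b in links', read pointwise
def hasParentA (links : List (List Int)) (x : Int) : Bool :=
  links.any (fun l => pvLinkB l == x)

-- 'root = 1; for i in range(1, n + 1): if not has_parent[i]: root = i; break'
def rootA (n : Nat) (links : List (List Int)) : Int :=
  (((PySem.List.pyRange 1 ((n : Int) + 1) 1).find? (fun i => !hasParentA links i)).getD 1)

-- the recursive dfs; dp[node] is returned as the pair (dp[node][0], dp[node][1]);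
-- fuel is only a totality device, n + 1 suffices on every Pre_ input
def dfsA (tree : Int → List Int) (sales : List Int) : Nat → Int → Int × Int
  | 0, _ => (0, 0)
  | f + 1, node =>
    if tree node = [] then
      (0, PySem.List.pyGetD sales (node - 1) 0)
    else
      let p := (tree node).foldl
        (fun (acc : Int × Int) c =>
          let r := dfsA tree sales f c
          let m := min r.1 r.2
          (acc.1 + m, min acc.2 (r.2 - m))) (0, pvINF)
      (p.1 + p.2, PySem.List.pyGetD sales (node - 1) 0 + p.1)

def solution (sales : List Int) (links : List (List Int)) : Int :=
  let n := sales.length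
  let root := rootA n links
  let r := dfsA (treeA links) sales (n + 1) root
  min r.1 r.2

-- ===== PORT B =====
-- body of 'for child in kids: …', reading the dp dict (dp[child] exists on every Pre_ input)
def stepB (dp : PySem.Dict Int (Int × Int)) (acc : Int × Int) (c : Int) : Int × Int :=
  let r := dp.getD c (0, 0)
  let m := min r.1 r.2
  (acc.1 + m, min acc.2 (r.2 - m))

-- the explicit-stack post-order 'while stack:' loop; fuel is only a totality device
def runB (ch : Int → List Int) (sales : List Int) :
    Nat → List (Int × Bool) → PySem.Dict Int (Int × Int) → PySem.Dict Int (Int × Int)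
  | 0, _, dp => dp
  | _ + 1, [], dp => dp
  | f + 1, (node, proc) :: rest, dp =>
    let kids := ch node
    if proc then
      let dp' :=
        if kids = [] then dp.insert node (0, PySem.List.pyGetD sales (node - 1) 0)
        else
          let p := kids.foldl (stepB dp) (0, pvINF)
          dp.insert node (p.1 + p.2, PySem.List.pyGetD sales (node - 1) 0 + p.1)
      runB ch sales f rest dp'
    else
      runB ch sales f (kids.map (fun c => (c, false)) ++ (node, true) :: rest) dp

-- fuel bound: twice the subtree size (each node is popped twice)
def szB (ch : Int → List Int) : Nat → Int → Nat
  | 0, _ => 0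
  | f + 1, x => 1 + ((ch x).map (szB ch f)).sum

def solution_alt (sales : List Int) (links : List (List Int)) : Int :=
  let n := sales.length
  let root := rootA n links
  let dp := runB (treeA links) sales (2 * szB (treeA links) (n + 1) root) [(root, false)] PySem.Dict.empty
  let r := dp.getD root (0, 0)
  min r.1 r.2

-- ===== PRECONDITION & SPEC =====
-- first parent of x ('tree' edges read child-to-parent)
def parentOf (links : List (List Int)) (x : Int) : Option Int :=
  (links.find? (fun l => pvLinkB l == x)).map pvLinkA

-- 'the parent chain from x reaches a parentless node within f steps'
def upOk (links : List (List Int)) : Nat → Int → Bool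
  | 0, x => (parentOf links x).isNone
  | f + 1, x =>
    match parentOf links x with
    | none => true
    | some p => upOk links f p

-- Pre_ asks that (sales, links) is a rooted tree on nodes 1..n: it excludes inputs on which A raises
-- (n = 0, malformed or out-of-range links) or recurses forever (a cycle under the root), and also inputs
-- A returns on only by accident of its array representation (a cycle away from the chosen root, duplicated
-- child entries, negative link entries that wrap around Python's list indexing).
def Pre_solution (sales : List Int) (links : List (List Int)) : Prop :=
  1 ≤ sales.length ∧
  (∀ l ∈ links, l.length = 2 ∧ 1 ≤ pvLinkA l ∧ pvLinkA l ≤ (sales.length : Int) ∧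
     1 ≤ pvLinkB l ∧ pvLinkB l ≤ (sales.length : Int)) ∧
  (links.map pvLinkB).Nodup ∧
  (∀ l ∈ links, upOk links sales.length (pvLinkB l) = true)

instance (sales : List Int) (links : List (List Int)) : Decidable (Pre_solution sales links) := by
  unfold Pre_solution; infer_instance

def pvWitness_solution : List Int × List (List Int) := ([5, 3, 2], [[1, 2], [1, 3]])

def Spec_solution (sales : List Int) (links : List (List Int)) (out : Int) : Prop := out = solution_alt sales links
instance (sales : List Int) (links : List (List Int)) (out : Int) : Decidable (Spec_solution sales links out) := by unfold Spec_solution; infer_instance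

-- ===== CLAIM (what is proved, stated in full; the proofs are below) =====
def Claim_equal_solution : Prop := ∀ (sales : List Int) (links : List (List Int)), Dom_solution sales links → Pre_solution sales links → Spec_solution sales links (solution sales links)

-- ===== LEMMAS AND PROOFS =====

-- tree construction equalities

theorem treeA_eq_filter (links : List (List Int)) (x : Int) :
    treeA links x = (links.filter (fun l => pvLinkA l == x)).map pvLinkB := by
  unfold treeA
  rw [PySem.List.foldl_append_if]
  simp

-- termination predicate for the downward recursion

def TermsF (ch : Int → List Int) : Nat → Int → Prop
  | 0, _ => False
  | f + 1, x => ∀ c ∈ ch x, TermsF ch f c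

theorem dfsA_irrel (ch : Int → List Int) (sales : List Int) :
    ∀ f g x, TermsF ch f x → TermsF ch g x →
      dfsA ch sales f x = dfsA ch sales g x := by
  intro f
  induction f with
  | zero => intro g x h _; exact h.elim
  | succ f ih =>
    intro g x hf hg
    obtain ⟨g', rfl⟩ : ∃ g', g = g' + 1 := by
      cases g with
      | zero => exact hg.elim
      | succ g' => exact ⟨g', rfl⟩
    show dfsA ch sales (f + 1) x = dfsA ch sales (g' + 1) x
    rw [dfsA, dfsA]
    by_cases hx : ch x = []
    · simp [hx]
    · simp only [hx]
      have hfold : (ch x).foldl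
          (fun (acc : Int × Int) c =>
            let r := dfsA ch sales f c
            let m := min r.1 r.2
            (acc.1 + m, min acc.2 (r.2 - m))) (0, pvINF)
        = (ch x).foldl
          (fun (acc : Int × Int) c =>
            let r := dfsA ch sales g' c
            let m := min r.1 r.2
            (acc.1 + m, min acc.2 (r.2 - m))) (0, pvINF) := by
        apply PySem.List.foldl_congr_mem
        intro acc c hc
        simp only []
        rw [ih g' c (hf c hc) (hg c hc)]
      rw [hfold]

-- parent-chain facts

theorem find_unique (f : List Int → Int) (c : Int) :
    ∀ (links : List (List Int)), (links.map f).Nodup → ∀ l ∈ links, f l = c →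
      links.find? (fun y => f y == c) = some l := by
  intro links
  induction links with
  | nil => intro _ l hl; exact absurd hl (List.not_mem_nil)
  | cons h t ih =>
    intro hnd l hl hfl
    rw [List.map_cons, List.nodup_cons] at hnd
    by_cases hh : f h = c
    · have : l = h := by
        rcases List.mem_cons.mp hl with rfl | hlt
        · rfl
        · exfalso
          exact hnd.1 (by rw [hh, ← hfl]; exact List.mem_map_of_mem hlt)
      subst this
      rw [List.find?_cons_of_pos (by simp [hh])]
    · have hlt : l ∈ t := by
        rcases List.mem_cons.mp hl with rfl | hlt
        · exact absurd hfl hh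
        · exact hlt
      rw [List.find?_cons_of_neg (by simp [hh]), ih hnd.2 l hlt hfl]

theorem parent_of_child (links : List (List Int)) (x c : Int)
    (hnd : (links.map pvLinkB).Nodup) (hc : c ∈ treeA links x) :
    parentOf links c = some x := by
  rw [treeA_eq_filter] at hc
  obtain ⟨l, hl, rfl⟩ := List.mem_map.mp hc
  rw [List.mem_filter] at hl
  unfold parentOf
  rw [find_unique pvLinkB (pvLinkB l) links hnd l hl.1 rfl]
  simp
  exact beq_iff_eq.mp hl.2

theorem upOk_succ_child (links : List (List Int)) (c x : Int)
    (hp : parentOf links c = some x) (f : Nat) :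
    upOk links (f + 1) c = upOk links f x := by
  simp only [upOk, hp]

theorem upOk_zero_child (links : List (List Int)) (c x : Int)
    (hp : parentOf links c = some x) :
    upOk links 0 c = false := by
  simp [upOk, hp]

-- each node's minimal chain length; children sit one deeper

theorem cl_child (links : List (List Int)) (c x : Int)
    (hp : parentOf links c = some x)
    (hc : ∃ d, upOk links d c = true) (hx : ∃ d, upOk links d x = true) :
    Nat.find hc = Nat.find hx + 1 := by
  have h1 : upOk links (Nat.find hx + 1) c = true := by
    rw [upOk_succ_child links c x hp]; exact Nat.find_spec hx
  have h2 : Nat.find hc ≤ Nat.find hx + 1 := Nat.find_min' hc h1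
  have h3 : Nat.find hc ≠ 0 := by
    intro h0
    have := Nat.find_spec hc
    rw [h0, upOk_zero_child links c x hp] at this
    exact Bool.false_ne_true this
  obtain ⟨d, hd⟩ : ∃ d, Nat.find hc = d + 1 := ⟨Nat.find hc - 1, by omega⟩
  have h4 : upOk links d x = true := by
    rw [← upOk_succ_child links c x hp, ← hd]; exact Nat.find_spec hc
  have h5 : Nat.find hx ≤ d := Nat.find_min' hx h4
  omega

theorem exists_upOk_of_child (links : List (List Int)) (n : Nat)
    (HB : ∀ l ∈ links, upOk links n (pvLinkB l) = true)
    (x c : Int) (hc : c ∈ treeA links x) : upOk links n c = true := by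
  rw [treeA_eq_filter] at hc
  obtain ⟨l, hl, rfl⟩ := List.mem_map.mp hc
  rw [List.mem_filter] at hl
  exact HB l hl.1

-- the tree is well-founded downward: termination fuel n + 1 - cl suffices

theorem termsF_of_cl (links : List (List Int)) (n : Nat)
    (hnd : (links.map pvLinkB).Nodup)
    (HB : ∀ l ∈ links, upOk links n (pvLinkB l) = true) :
    ∀ m (x : Int) (hx : ∃ d, upOk links d x = true), Nat.find hx ≤ n →
      n - Nat.find hx ≤ m → TermsF (treeA links) (n + 1 - Nat.find hx) x := by
  intro m
  induction m with
  | zero =>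
    intro x hx hle hm
    have hfx : Nat.find hx = n := by omega
    have he : n + 1 - Nat.find hx = 0 + 1 := by omega
    rw [he]
    intro c hc
    exfalso
    have hp := parent_of_child links x c hnd hc
    have hcu : upOk links n c = true := exists_upOk_of_child links n HB x c hc
    have hcx : ∃ d, upOk links d c = true := ⟨n, hcu⟩
    have := cl_child links c x hp hcx hx
    have := Nat.find_min' hcx hcu
    omega
  | succ m ih =>
    intro x hx hle hm
    have he : n + 1 - Nat.find hx = (n - Nat.find hx) + 1 := by omega
    rw [he]
    intro c hc
    have hp := parent_of_child links x c hnd hc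
    have hcu : upOk links n c = true := exists_upOk_of_child links n HB x c hc
    have hcx : ∃ d, upOk links d c = true := ⟨n, hcu⟩
    have hcl := cl_child links c x hp hcx hx
    have hcle : Nat.find hcx ≤ n := Nat.find_min' hcx hcu
    have := ih c hcx hcle (by omega)
    have he2 : n + 1 - Nat.find hcx = n - Nat.find hx := by omega
    rw [he2] at this
    exact this

-- the chosen root is parentless, and termination holds from it

theorem hasParent_parentOf (links : List (List Int)) (x : Int) :
    hasParentA links x = (parentOf links x).isSome := by
  unfold hasParentA parentOf
  rw [Bool.eq_iff_iff]
  simp [List.any_eq_true, List.find?_isSome]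

theorem noRoot_false (sales : List Int) (links : List (List Int))
    (hpre : Pre_solution sales links)
    (hall : ∀ i : Int, 1 ≤ i → i ≤ (sales.length : Int) → hasParentA links i = true) :
    False := by
  obtain ⟨hn, hbound, hnd, HB⟩ := hpre
  have key : ∀ d (x : Int), 1 ≤ x → x ≤ (sales.length : Int) → upOk links d x = true → False := by
    intro d
    induction d with
    | zero =>
      intro x h1 h2 h
      have := hall x h1 h2
      rw [hasParent_parentOf] at this
      unfold upOk at h
      rw [Option.isNone_iff_eq_none] at h
      rw [h] at this
      simp at this
    | succ d ih =>
      intro x h1 h2 h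
      have hp := hall x h1 h2
      rw [hasParent_parentOf] at hp
      obtain ⟨p, hps⟩ := Option.isSome_iff_exists.mp hp
      unfold upOk at h
      rw [hps] at h
      have hpmem : ∃ l ∈ links, pvLinkA l = p := by
        unfold parentOf at hps
        obtain ⟨l, hl1, hl2⟩ := Option.map_eq_some_iff.mp hps
        exact ⟨l, List.mem_of_find?_eq_some hl1, hl2⟩
      obtain ⟨l, hl, rfl⟩ := hpmem
      exact ih (pvLinkA l) (hbound l hl).2.1 (hbound l hl).2.2.1 h
  -- node 1 is in range and has a parent, hence a terminating chain by Pre_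
  have h1 : hasParentA links 1 = true := hall 1 (le_refl 1) (by exact_mod_cast hn)
  obtain ⟨l, hl, hlb⟩ := List.any_eq_true.mp h1
  have : upOk links sales.length 1 = true := by
    have := HB l hl
    rwa [beq_iff_eq.mp hlb] at this
  exact key sales.length 1 (le_refl 1) (by exact_mod_cast hn) this

theorem root_no_parent (sales : List Int) (links : List (List Int))
    (hpre : Pre_solution sales links) :
    parentOf links (rootA sales.length links) = none := by
  unfold rootA
  cases hf : (PySem.List.pyRange 1 ((sales.length : Int) + 1) 1).find? (fun i => !hasParentA links i) with
  | none =>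
    exfalso
    apply noRoot_false sales links hpre
    intro i h1 h2
    have := List.find?_eq_none.mp hf i (by
      rw [PySem.List.mem_pyRange_one]; omega)
    simpa using this
  | some i =>
    have hPi : hasParentA links i = false := by simpa using List.find?_some hf
    rw [hasParent_parentOf] at hPi
    simp only [Option.getD_some]
    exact Option.not_isSome_iff_eq_none.mp (by simp [hPi])

theorem termsF_root (sales : List Int) (links : List (List Int))
    (hpre : Pre_solution sales links) :
    TermsF (treeA links) (sales.length + 1) (rootA sales.length links) := by
  obtain ⟨hn, hbound, hnd, HB⟩ := id hpre
  have hnp := root_no_parent sales links hpre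
  have h0 : upOk links 0 (rootA sales.length links) = true := by
    unfold upOk; rw [hnp]; rfl
  have hx : ∃ d, upOk links d (rootA sales.length links) = true := ⟨0, h0⟩
  have hf0 : Nat.find hx = 0 := Nat.eq_zero_of_le_zero (Nat.find_min' hx h0)
  have := termsF_of_cl links sales.length hnd HB sales.length (rootA sales.length links) hx
    (by omega) (by omega)
  rwa [hf0, Nat.sub_zero] at this

-- the stack machine simulates the recursion

def GoodD (ch : Int → List Int) (sales : List Int) (dp : PySem.Dict Int (Int × Int)) : Prop :=
  ∀ k v, dp.get? k = some v → ∃ g, TermsF ch g k ∧ v = dfsA ch sales g k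

theorem run_list (ch : Int → List Int) (sales : List Int) (f : Nat)
    (H : ∀ x, TermsF ch f x → ∀ dp rest F, GoodD ch sales dp → 2 * szB ch f x ≤ F →
      ∃ dp', runB ch sales F ((x, false) :: rest) dp
               = runB ch sales (F - 2 * szB ch f x) rest dp'
        ∧ GoodD ch sales dp' ∧ dp'.contains x = true
        ∧ ∀ k, dp.contains k = true → dp'.contains k = true) :
    ∀ (kids : List Int), (∀ c ∈ kids, TermsF ch f c) → ∀ dp rest F, GoodD ch sales dp →
      2 * ((kids.map (szB ch f)).sum) ≤ F →
      ∃ dp', runB ch sales F ((kids.map (fun c => (c, false))) ++ rest) dp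
               = runB ch sales (F - 2 * (kids.map (szB ch f)).sum) rest dp'
        ∧ GoodD ch sales dp' ∧ (∀ c ∈ kids, dp'.contains c = true)
        ∧ ∀ k, dp.contains k = true → dp'.contains k = true := by
  intro kids
  induction kids with
  | nil =>
    intro _ dp rest F hg _
    exact ⟨dp, by simp, hg, by simp, fun k h => h⟩
  | cons c cs ih =>
    intro hterms dp rest F hg hF
    simp only [List.sum_cons, List.map] at hF ⊢
    obtain ⟨dp1, he1, hg1, hc1, hm1⟩ :=
      H c (hterms c (List.mem_cons_self)) dp ((cs.map (fun c => (c, false))) ++ rest) F hg (by omega)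
    obtain ⟨dp2, he2, hg2, hc2, hm2⟩ :=
      ih (fun c hc => hterms c (List.mem_cons_of_mem _ hc)) dp1 rest (F - 2 * szB ch f c) hg1 (by omega)
    refine ⟨dp2, ?_, hg2, ?_, fun k h => hm2 k (hm1 k h)⟩
    · rw [List.cons_append, he1, he2]
      congr 1
      omega
    · intro x hx
      rcases List.mem_cons.mp hx with rfl | hx
      · exact hm2 x hc1
      · exact hc2 x hx

theorem run_sim (ch : Int → List Int) (sales : List Int) :
    ∀ f x, TermsF ch f x → ∀ dp rest F, GoodD ch sales dp → 2 * szB ch f x ≤ F →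
      ∃ dp', runB ch sales F ((x, false) :: rest) dp
               = runB ch sales (F - 2 * szB ch f x) rest dp'
        ∧ GoodD ch sales dp' ∧ dp'.contains x = true
        ∧ ∀ k, dp.contains k = true → dp'.contains k = true := by
  intro f
  induction f with
  | zero => intro x h; exact h.elim
  | succ f ih =>
    intro x hterms dp rest F hg hF
    have hsz : szB ch (f + 1) x = 1 + ((ch x).map (szB ch f)).sum := rfl
    rw [hsz] at hF
    obtain ⟨F', rfl⟩ : ∃ F', F = F' + 1 := ⟨F - 1, by omega⟩
    have step1 : runB ch sales (F' + 1) ((x, false) :: rest) dp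
        = runB ch sales F' (((ch x).map (fun c => (c, false))) ++ (x, true) :: rest) dp := by
      rw [runB]; simp
    obtain ⟨dp2, he2, hg2, hc2, hm2⟩ :=
      run_list ch sales f ih (ch x) hterms dp ((x, true) :: rest) F' hg (by omega)
    -- now one 'processed' step
    obtain ⟨F'', hF''⟩ : ∃ F'', F' - 2 * ((ch x).map (szB ch f)).sum = F'' + 1 :=
      ⟨F' - 2 * ((ch x).map (szB ch f)).sum - 1, by omega⟩
    set dp3 : PySem.Dict Int (Int × Int) :=
      (if ch x = [] then dp2.insert x (0, PySem.List.pyGetD sales (x - 1) 0)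
       else
         let p := (ch x).foldl (stepB dp2) (0, pvINF)
         dp2.insert x (p.1 + p.2, PySem.List.pyGetD sales (x - 1) 0 + p.1)) with hdp3
    have step2 : runB ch sales (F'' + 1) ((x, true) :: rest) dp2 = runB ch sales F'' rest dp3 := by
      rw [runB]; simp [hdp3]
    -- the value stored at x is the dfs value
    have hval : dp3 = dp2.insert x (dfsA ch sales (f + 1) x) := by
      rw [hdp3, dfsA]
      by_cases hx : ch x = []
      · simp [hx]
      · simp only [hx]
        have hfold : (ch x).foldl (stepB dp2) ((0 : Int), pvINF)
            = (ch x).foldl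
              (fun (acc : Int × Int) c =>
                let r := dfsA ch sales f c
                let m := min r.1 r.2
                (acc.1 + m, min acc.2 (r.2 - m))) (0, pvINF) := by
          apply PySem.List.foldl_congr_mem
          intro acc c hc
          have hcon := hc2 c hc
          have hsome : (dp2.get? c).isSome := by
            rw [← PySem.Dict.contains_eq_isSome_get?]; exact hcon
          obtain ⟨v, hv⟩ := Option.isSome_iff_exists.mp hsome
          obtain ⟨g, hgT, hgv⟩ := hg2 c v hv
          have hveq : v = dfsA ch sales f c := by
            rw [hgv]; exact dfsA_irrel ch sales g f c hgT (hterms c hc)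
          unfold stepB
          rw [PySem.Dict.getD_eq_get?_getD, hv]
          simp only [Option.getD_some]
          rw [hveq]
        rw [hfold]
        simp
    refine ⟨dp3, ?_, ?_, ?_, ?_⟩
    · rw [step1, he2, hF'', step2]
      congr 1
      omega
    · intro k v hk
      rw [hval, PySem.Dict.get?_insert] at hk
      by_cases hkx : k = x
      · rw [if_pos hkx] at hk
        subst hkx
        exact ⟨f + 1, hterms, (Option.some_inj.mp hk).symm⟩
      · rw [if_neg hkx] at hk
        exact hg2 k v hk
    · rw [hval]; exact PySem.Dict.contains_insert_self dp2 x _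
    · intro k h
      rw [hval, PySem.Dict.contains_insert]
      simp [hm2 k h]


-- ===== VERDICT (by name: the statement is the Claim_ definition above) =====
theorem solution_spec : Claim_equal_solution := by
  intro sales links _hdom hpre
  unfold Spec_solution
  have hterm := termsF_root sales links hpre
  simp only [solution, solution_alt]
  set n := sales.length
  set root := rootA n links
  set ch := treeA links
  have hge : GoodD ch sales PySem.Dict.empty := by
    intro k v hk
    rw [PySem.Dict.get?_empty] at hk
    exact absurd hk (by simp)
  obtain ⟨dp', he, hg, hc, _⟩ :=
    run_sim ch sales (n + 1) root hterm PySem.Dict.empty [] (2 * szB ch (n + 1) root) hge (le_refl _)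
  have hzero : 2 * szB ch (n + 1) root - 2 * szB ch (n + 1) root = 0 := by omega
  rw [hzero] at he
  have hrun : runB ch sales 0 ([] : List (Int × Bool)) dp' = dp' := rfl
  rw [hrun] at he
  rw [he]
  have hsome : (dp'.get? root).isSome := by
    rw [← PySem.Dict.contains_eq_isSome_get?]; exact hc
  obtain ⟨v, hv⟩ := Option.isSome_iff_exists.mp hsome
  obtain ⟨g, hgT, hgv⟩ := hg root v hv
  have : v = dfsA ch sales (n + 1) root := by
    rw [hgv]; exact dfsA_irrel ch sales g (n + 1) root hgT hterm
  rw [PySem.Dict.getD_eq_get?_getD, hv, Option.getD_some, this]
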